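-- pv_equiv track=rewrite | github.com/AkaDeMiA-event/LINEBot2022-DRF | api/views.py | my_numeron
-- ===== SOURCE A (Python) =====
-- def my_numeron(input_numbers, answer_numbers):
--     eat = 0
--     bite = 0
--     for i, number in enumerate(input_numbers):
--         if number in answer_numbers:
--             if number == answer_numbers[i]:
--                 eat += 1
--             else:
--                 bite += 1
--     return eat, bite
-- ===== SOURCE B (Python) =====
-- def my_numeron(input_numbers, answer_numbers):
--     answer_set = set(answer_numbers)
--     eat = sum(x == y for x, y in zip(input_numbers, answer_numbers))
--     hits = sum(x in answer_set for x in input_numbers)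
--     return eat, hits - eat
-- ===== Notes on version B (the rewrite author's own statement) =====
-- stated objective: faster
-- what changed: Replaces A's single stateful branch loop (list membership then indexing per element) by two index-free aggregate counts: eat as a positional zip equality count (no membership test, no indexing) and hits as a set-membership count, with bite derived by subtraction; correct because positional equality implies membership and Pre_ excludes the IndexError inputs.
import Mathlib
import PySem

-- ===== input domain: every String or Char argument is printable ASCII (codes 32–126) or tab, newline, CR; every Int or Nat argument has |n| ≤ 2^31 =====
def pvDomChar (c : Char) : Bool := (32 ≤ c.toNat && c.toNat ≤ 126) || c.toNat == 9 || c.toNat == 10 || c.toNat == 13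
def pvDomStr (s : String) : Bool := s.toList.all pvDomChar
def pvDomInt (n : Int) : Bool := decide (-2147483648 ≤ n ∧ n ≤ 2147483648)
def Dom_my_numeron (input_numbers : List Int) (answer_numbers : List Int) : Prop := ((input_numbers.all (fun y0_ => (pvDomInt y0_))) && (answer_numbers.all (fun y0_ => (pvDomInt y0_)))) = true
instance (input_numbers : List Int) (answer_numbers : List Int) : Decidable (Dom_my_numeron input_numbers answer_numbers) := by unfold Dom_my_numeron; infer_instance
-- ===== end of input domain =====

-- B replaces A's stateful branch loop (membership test then indexing per element) by two
-- index-free aggregate counts — eat as a positional zip equality count, hits as a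
-- set-membership count — with bite = hits - eat.

-- ===== PORT A =====
def my_numeron (input_numbers : List Int) (answer_numbers : List Int) : Int × Int :=
  (PySem.List.enumerate input_numbers 0).foldl
    (fun (s : Int × Int) (p : Int × Int) =>
      if p.2 ∈ answer_numbers then
        if (PySem.List.pyGet? answer_numbers p.1).getD 0 = p.2 then (s.1 + 1, s.2)
        else (s.1, s.2 + 1)
      else s)
    (0, 0)

-- ===== PORT B =====
def my_numeron_alt (input_numbers : List Int) (answer_numbers : List Int) : Int × Int :=
  let answer_set : PySem.Set Int := PySem.Set.ofList answer_numbers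
  let eat : Int := (List.zip input_numbers answer_numbers).foldl
    (fun acc p => if p.1 = p.2 then acc + 1 else acc) 0
  let hits : Int := input_numbers.foldl
    (fun acc x => if x ∈ answer_set then acc + 1 else acc) 0
  (eat, hits - eat)

-- ===== PRECONDITION & SPEC =====
-- Pre_ excludes exactly the inputs where Python raises IndexError: some position i of
-- input_numbers holds a value present in answer_numbers while i is out of range for answer_numbers.
def Pre_my_numeron (input_numbers : List Int) (answer_numbers : List Int) : Prop :=
  ∀ i < input_numbers.length, input_numbers.getD i 0 ∈ answer_numbers → i < answer_numbers.length
instance (input_numbers : List Int) (answer_numbers : List Int) : Decidable (Pre_my_numeron input_numbers answer_numbers) := by unfold Pre_my_numeron; infer_instance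
def pvWitness_my_numeron : List Int × List Int := ([1, 2, 9], [2, 2, 3])
def Spec_my_numeron (input_numbers : List Int) (answer_numbers : List Int) (out : Int × Int) : Prop := out = my_numeron_alt input_numbers answer_numbers
instance (input_numbers : List Int) (answer_numbers : List Int) (out : Int × Int) : Decidable (Spec_my_numeron input_numbers answer_numbers out) := by unfold Spec_my_numeron; infer_instance

-- ===== CLAIM (what is proved, stated in full; the proofs are below) =====
def Claim_equal_my_numeron : Prop := ∀ (input_numbers : List Int) (answer_numbers : List Int), Dom_my_numeron input_numbers answer_numbers → Pre_my_numeron input_numbers answer_numbers → Spec_my_numeron input_numbers answer_numbers (my_numeron input_numbers answer_numbers)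

-- ===== LEMMAS AND PROOFS =====

-- A's fold computes, componentwise, the counts of "positional match" and "member but mismatch".
theorem foldA_count (ans : List Int) (l : List (Int × Int)) (e b : Int) :
    l.foldl
      (fun (s : Int × Int) (p : Int × Int) =>
        if p.2 ∈ ans then
          if (PySem.List.pyGet? ans p.1).getD 0 = p.2 then (s.1 + 1, s.2)
          else (s.1, s.2 + 1)
        else s)
      (e, b)
    = (e + (l.countP (fun p => decide (p.2 ∈ ans) && decide ((PySem.List.pyGet? ans p.1).getD 0 = p.2)) : Int),
       b + (l.countP (fun p => decide (p.2 ∈ ans) && !decide ((PySem.List.pyGet? ans p.1).getD 0 = p.2)) : Int)) := by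
  induction l generalizing e b with
  | nil => simp
  | cons p l ih =>
    by_cases hm : p.2 ∈ ans <;> by_cases he : (PySem.List.pyGet? ans p.1).getD 0 = p.2 <;>
      simp [List.foldl_cons, hm, he, ih] <;> ring

-- Membership hits over the enumerated list split into matches plus mismatches.
theorem count_split (ans : List Int) (l : List (Int × Int)) :
    l.countP (fun p => decide (p.2 ∈ ans))
    = l.countP (fun p => decide (p.2 ∈ ans) && decide ((PySem.List.pyGet? ans p.1).getD 0 = p.2))
      + l.countP (fun p => decide (p.2 ∈ ans) && !decide ((PySem.List.pyGet? ans p.1).getD 0 = p.2)) := by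
  induction l with
  | nil => simp
  | cons p l ih =>
    by_cases hm : p.2 ∈ ans <;> by_cases he : (PySem.List.pyGet? ans p.1).getD 0 = p.2 <;>
      simp [hm, he, ih] <;> omega

-- Counting a property of the value over the enumerated list equals counting over the list.
theorem count_snd_enumerate (xs : List Int) (s : Int) (q : Int → Bool) :
    (PySem.List.enumerate xs s).countP (fun p => q p.2) = xs.countP q := by
  induction xs generalizing s with
  | nil => simp [PySem.List.enumerate_nil]
  | cons x xs ih => simp [PySem.List.enumerate_cons, List.countP_cons, ih]

-- Under the no-IndexError hypothesis (shifted by k), the positional-match count of A's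
-- enumerated loop equals B's zip equality count against the k-dropped answers.
theorem eat_zip (ans : List Int) (inp : List Int) (k : ℕ)
    (h : ∀ i < inp.length, inp.getD i 0 ∈ ans → k + i < ans.length) :
    (PySem.List.enumerate inp (k : Int)).countP
      (fun p => decide (p.2 ∈ ans) && decide ((PySem.List.pyGet? ans p.1).getD 0 = p.2))
    = (List.zip inp (ans.drop k)).countP (fun p => decide (p.1 = p.2)) := by
  induction inp generalizing k with
  | nil => simp [PySem.List.enumerate_nil]
  | cons x xs ih =>
    have htail : ∀ i < xs.length, xs.getD i 0 ∈ ans → (k + 1) + i < ans.length := by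
      intro i hi hm
      have := h (i + 1) (by simp; omega) (by simpa using hm)
      omega
    have ihk := ih (k + 1) htail
    push_cast at ihk
    by_cases hk : k < ans.length
    · have hdrop : ans.drop k = ans[k] :: ans.drop (k + 1) :=
        List.drop_eq_getElem_cons hk
      have hget : PySem.List.pyGet? ans (k : Int) = some ans[k] := by
        simp [PySem.List.pyGet?_natCast, List.getElem?_eq_getElem hk]
      rw [PySem.List.enumerate_cons, hdrop, List.zip_cons_cons, List.countP_cons,
        List.countP_cons, ihk]
      congr 1
      by_cases he : x = ans[k]
      · have hm : x ∈ ans := he ▸ List.getElem_mem hk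
        simp [hget, he]
      · have he' : ¬ (ans[k] = x) := fun hh => he hh.symm
        by_cases hm : x ∈ ans <;> simp [hget, he, he', hm]
    · have hm : x ∉ ans := fun hm => hk (by have := h 0 (by simp) (by simpa using hm); omega)
      have hdrop : ans.drop k = [] := List.drop_eq_nil_of_le (by omega)
      have hdrop' : ans.drop (k + 1) = [] := List.drop_eq_nil_of_le (by omega)
      rw [hdrop'] at ihk
      rw [PySem.List.enumerate_cons, hdrop]
      simp [hm, ihk]

-- ===== VERDICT (by name: the statement is the Claim_ definition above) =====
theorem my_numeron_spec : Claim_equal_my_numeron := by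
  intro inp ans _ hpre
  unfold Spec_my_numeron my_numeron my_numeron_alt
  simp only [PySem.Set.mem_ofList]
  rw [foldA_count,
    PySem.List.foldl_ite_add_one (p := fun p : Int × Int => p.1 = p.2),
    PySem.List.foldl_ite_add_one (p := fun x : Int => x ∈ ans)]
  have hz := eat_zip ans inp 0 (by simpa using hpre)
  rw [List.drop_zero] at hz
  rw [← hz,
    ← count_snd_enumerate inp 0 (fun x => decide (x ∈ ans)), count_split ans]
  simp only [Prod.mk.injEq]
  constructor <;> push_cast <;> ring
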